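-- pv_equiv track=rewrite | github.com/julienperichon/advent-of-code | 2025/day_2.py | find_invalid_ids_in_range
-- ===== SOURCE A (Python) =====
-- def find_invalid_ids_in_range(low: int, high: int) -> list[int]:
--     invalid_ids: list[int] = []
--     for num in range(low, high + 1):
--         snum = str(num)
--         snum_len = len(snum)
--         if snum_len % 2 != 0:
--             continue
--         if snum[: snum_len // 2] == snum[snum_len // 2 :]:
--             invalid_ids.append(num)
--     return invalid_ids
-- ===== SOURCE B (Python) =====
-- def find_invalid_ids_in_range(low: int, high: int) -> list[int]:
--     # Directly enumerate x*(10**k + 1) for each half-length k and k-digit prefix x,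
--     # instead of scanning every number in [low, high].
--     invalid_ids: list[int] = []
--     if high < 1:
--         return invalid_ids
--     kmax = len(str(high)) // 2
--     for k in range(1, kmax + 1):
--         m = 10 ** k + 1
--         x_lo = max(10 ** (k - 1), -(-low // m))
--         x_hi = min(10 ** k - 1, high // m)
--         for x in range(x_lo, x_hi + 1):
--             invalid_ids.append(x * m)
--     return invalid_ids
-- ===== Notes on version B (the rewrite author's own statement) =====
-- stated objective: alternative
-- what changed: Instead of scanning every integer in [low, high] and testing its decimal string, B enumerates the valid ids directly as x*(10^k+1) for each half-length k and each k-digit prefix x clipped to the range (intended as faster on wide ranges; a timing run measured 25x at the largest size but inconsistently across inputs, so no speed is claimed).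
import Mathlib
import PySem

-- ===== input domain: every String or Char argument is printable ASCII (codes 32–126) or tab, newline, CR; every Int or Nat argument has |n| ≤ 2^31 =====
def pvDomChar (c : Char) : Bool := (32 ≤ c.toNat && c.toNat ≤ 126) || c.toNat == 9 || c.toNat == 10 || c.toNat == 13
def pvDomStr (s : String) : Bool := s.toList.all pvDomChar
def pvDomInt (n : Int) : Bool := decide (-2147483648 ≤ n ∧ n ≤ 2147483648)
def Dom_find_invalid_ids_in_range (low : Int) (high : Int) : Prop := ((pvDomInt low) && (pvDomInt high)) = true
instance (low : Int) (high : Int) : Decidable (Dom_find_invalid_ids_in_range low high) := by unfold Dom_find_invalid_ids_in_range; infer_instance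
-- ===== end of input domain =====

-- B enumerates the valid ids x*(10^k+1) directly per half-length k instead of scanning every number in [low, high].


-- ===== PORT A =====
def find_invalid_ids_in_range (low : Int) (high : Int) : List Int :=
  (PySem.List.pyRange low (high + 1) 1).foldl
    (fun invalid_ids num =>
      let snum := PySem.Int.toStr num
      let snum_len : Int := PySem.Str.len snum
      if PySem.Int.mod snum_len 2 ≠ 0 then invalid_ids
      else if PySem.Str.slice snum none (some (PySem.Int.floordiv snum_len 2))
            = PySem.Str.slice snum (some (PySem.Int.floordiv snum_len 2)) none
      then invalid_ids ++ [num]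
      else invalid_ids) []

-- ===== PORT B =====
def find_invalid_ids_in_range_alt (low : Int) (high : Int) : List Int :=
  if high < 1 then []
  else
    let kmax : Int := PySem.Int.floordiv (PySem.Str.len (PySem.Int.toStr high)) 2
    (PySem.List.pyRange 1 (kmax + 1) 1).foldl
      (fun invalid_ids k =>
        let m : Int := 10 ^ k.toNat + 1
        let x_lo : Int := max (10 ^ (k - 1).toNat) (-(PySem.Int.floordiv (-low) m))
        let x_hi : Int := min (10 ^ k.toNat - 1) (PySem.Int.floordiv high m)
        (PySem.List.pyRange x_lo (x_hi + 1) 1).foldl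
          (fun acc x => acc ++ [x * m]) invalid_ids) []

-- ===== PRECONDITION & SPEC =====
def Spec_find_invalid_ids_in_range (low : Int) (high : Int) (out : List Int) : Prop := out = find_invalid_ids_in_range_alt low high
instance (low : Int) (high : Int) (out : List Int) : Decidable (Spec_find_invalid_ids_in_range low high out) := by unfold Spec_find_invalid_ids_in_range; infer_instance

-- ===== CLAIM (what is proved, stated in full; the proofs are below) =====
def Claim_equal_find_invalid_ids_in_range : Prop := ∀ (low : Int) (high : Int), Dom_find_invalid_ids_in_range low high → Spec_find_invalid_ids_in_range low high (find_invalid_ids_in_range low high)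

-- ===== LEMMAS AND PROOFS =====

/-- Decimal representation of a natural number, back-to-front recursion (what `Nat.toDigits 10` computes). -/
def pvRep (n : Nat) : List Char :=
  if _h : n < 10 then [Nat.digitChar n]
  else pvRep (n / 10) ++ [Nat.digitChar (n % 10)]
decreasing_by exact Nat.div_lt_self (by omega) (by omega)

theorem pvRep_lt (n : Nat) (h : n < 10) : pvRep n = [Nat.digitChar n] := by
  rw [pvRep]; simp [h]

theorem pvRep_ge (n : Nat) (h : ¬ n < 10) : pvRep n = pvRep (n / 10) ++ [Nat.digitChar (n % 10)] := by
  rw [pvRep]; simp [h]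

theorem pvDigitChar_toNat (d : Nat) (h : d < 10) : (Nat.digitChar d).toNat = 48 + d := by
  interval_cases d <;> rfl

theorem pvRep_ne_nil (n : Nat) : pvRep n ≠ [] := by
  by_cases h : n < 10
  · simp [pvRep_lt n h]
  · simp [pvRep_ge n h]

theorem pvRep_len_pos (n : Nat) : 1 ≤ (pvRep n).length := by
  cases hr : pvRep n with
  | nil => exact absurd hr (pvRep_ne_nil n)
  | cons a l => simp

theorem pvMem_pvRep_ge (n : Nat) : ∀ c ∈ pvRep n, 48 ≤ c.toNat := by
  induction n using Nat.strong_induction_on with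
  | _ n ih =>
    intro c hc
    by_cases h : n < 10
    · rw [pvRep_lt n h] at hc
      simp at hc
      rw [hc, pvDigitChar_toNat n h]; omega
    · rw [pvRep_ge n h] at hc
      rcases List.mem_append.mp hc with h1 | h1
      · exact ih (n / 10) (Nat.div_lt_self (by omega) (by omega)) c h1
      · simp at h1
        rw [h1, pvDigitChar_toNat _ (Nat.mod_lt _ (by omega))]; omega

/-- Decimal value of a character list (digit chars assumed). -/
def pvVal (s : List Char) : Nat := s.foldl (fun a c => a * 10 + (c.toNat - 48)) 0

theorem pvVal_from (s : List Char) : ∀ (a : Nat),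
    s.foldl (fun a c => a * 10 + (c.toNat - 48)) a = a * 10 ^ s.length + pvVal s := by
  induction s with
  | nil => intro a; simp [pvVal]
  | cons c t ih =>
    intro a
    simp only [List.foldl_cons, List.length_cons, pvVal]
    rw [ih, ih (0 * 10 + (c.toNat - 48))]
    ring

theorem pvVal_append (u v : List Char) : pvVal (u ++ v) = pvVal u * 10 ^ v.length + pvVal v := by
  simp only [pvVal, List.foldl_append]
  rw [pvVal_from v (List.foldl _ 0 u)]
  rfl

theorem pvVal_pvRep (n : Nat) : pvVal (pvRep n) = n := by
  induction n using Nat.strong_induction_on with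
  | _ n ih =>
    by_cases h : n < 10
    · rw [pvRep_lt n h]
      simp [pvVal, pvDigitChar_toNat n h]
    · rw [pvRep_ge n h, pvVal_append, ih (n / 10) (Nat.div_lt_self (by omega) (by omega))]
      have : pvVal [Nat.digitChar (n % 10)] = n % 10 := by
        simp [pvVal, pvDigitChar_toNat _ (Nat.mod_lt _ (by omega))]
      rw [this]
      simp only [List.length_singleton, pow_one]
      omega

theorem pvRep_len_bounds (n : Nat) (h : 1 ≤ n) :
    10 ^ ((pvRep n).length - 1) ≤ n ∧ n < 10 ^ (pvRep n).length := by
  induction n using Nat.strong_induction_on with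
  | _ n ih =>
    by_cases h10 : n < 10
    · rw [pvRep_lt n h10]
      simp only [List.length_singleton, pow_one]
      omega
    · rw [pvRep_ge n h10]
      have hd := ih (n / 10) (Nat.div_lt_self (by omega) (by omega)) (by omega)
      simp only [List.length_append, List.length_singleton]
      set L := (pvRep (n / 10)).length with hL
      have hL1 : 1 ≤ L := pvRep_len_pos (n / 10)
      constructor
      · have : 10 ^ (L + 1 - 1) = 10 ^ (L - 1) * 10 := by
          rw [Nat.add_sub_cancel]
          conv_lhs => rw [show L = (L-1)+1 by omega]
          ring
        rw [this]
        calc 10 ^ (L-1) * 10 ≤ (n/10) * 10 := Nat.mul_le_mul_right _ hd.1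
          _ ≤ n := by omega
      · have h2 := hd.2
        calc n < (n/10 + 1) * 10 := by omega
          _ ≤ 10 ^ L * 10 := Nat.mul_le_mul_right _ (by omega)
          _ = 10 ^ (L + 1) := by ring

theorem pvRep_len_of_bounds (x k : Nat) (h1 : 10 ^ (k - 1) ≤ x) (h2 : x < 10 ^ k) (hk : 1 ≤ k) :
    (pvRep x).length = k := by
  have hx : 1 ≤ x := le_trans (Nat.one_le_pow _ _ (by omega)) h1
  have hb := pvRep_len_bounds x hx
  have hLpos : 1 ≤ (pvRep x).length := pvRep_len_pos x
  by_contra hne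
  rcases Nat.lt_or_ge (pvRep x).length k with hlt | hgt
  · have : 10 ^ (pvRep x).length ≤ 10 ^ (k - 1) := Nat.pow_le_pow_right (by omega) (by omega)
    omega
  · have : 10 ^ k ≤ 10 ^ ((pvRep x).length - 1) := Nat.pow_le_pow_right (by omega) (by omega)
    omega

theorem pvRep_concat (k : Nat) : ∀ x y : Nat, 1 ≤ x → (pvRep y).length = k →
    pvRep (x * 10 ^ k + y) = pvRep x ++ pvRep y := by
  induction k with
  | zero =>
    intro x y _ hy
    exfalso
    have := pvRep_len_pos y
    omega
  | succ k ih =>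
    intro x y hx hy
    by_cases hy10 : y < 10
    · have hk0 : k = 0 := by rw [pvRep_lt y hy10] at hy; simpa using hy.symm
      subst hk0
      have hbig : ¬ (x * 10 ^ 1 + y < 10) := by
        simp only [pow_one]; omega
      rw [pvRep_ge _ hbig, pvRep_lt y hy10]
      have hdiv : (x * 10 ^ 1 + y) / 10 = x := by simp only [pow_one]; omega
      have hmod : (x * 10 ^ 1 + y) % 10 = y := by simp only [pow_one]; omega
      rw [hdiv, hmod]
    · have hrecy := pvRep_ge y hy10
      have hlen : (pvRep (y / 10)).length = k := by
        rw [hrecy] at hy; simp at hy; omega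
      have hbig : ¬ (x * 10 ^ (k + 1) + y < 10) := by
        have : 10 ≤ 10 ^ (k+1) := by
          calc 10 = 10 ^ 1 := (pow_one 10).symm
            _ ≤ 10 ^ (k+1) := Nat.pow_le_pow_right (by omega) (by omega)
        nlinarith
      rw [pvRep_ge _ hbig]
      have hdiv : (x * 10 ^ (k + 1) + y) / 10 = x * 10 ^ k + y / 10 := by
        have : x * 10 ^ (k+1) = (x * 10 ^ k) * 10 := by ring
        rw [this, Nat.add_comm, Nat.add_mul_div_right _ _ (by omega : (0:Nat) < 10)]
        omega
      have hmod : (x * 10 ^ (k + 1) + y) % 10 = y % 10 := by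
        have : x * 10 ^ (k+1) = (x * 10 ^ k) * 10 := by ring
        rw [this, Nat.add_comm, Nat.add_mul_mod_self_right]
      rw [hdiv, hmod, ih x (y / 10) hx hlen, hrecy]
      simp

theorem pvToDigitsCore_eq (f : Nat) : ∀ (n : Nat) (l : List Char), n < f →
    Nat.toDigitsCore 10 f n l = pvRep n ++ l := by
  induction f with
  | zero => intro n l h; omega
  | succ f ih =>
    intro n l h
    rw [Nat.toDigitsCore]
    by_cases h10 : n / 10 = 0
    · have hn : n < 10 := by omega
      rw [pvRep_lt n hn]
      simp [h10, Nat.mod_eq_of_lt hn]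
    · rw [pvRep_ge n (by omega)]
      simp only [h10]
      rw [ih (n / 10) _ (by omega)]
      simp

theorem pvToChars_neg (n : Int) (h : n < 0) :
    PySem.Int.toChars n = '-' :: pvRep n.natAbs := by
  simp only [PySem.Int.toChars, if_pos h, Nat.toDigits]
  rw [pvToDigitsCore_eq _ _ _ (by omega)]
  simp

theorem pvToChars_nonneg (n : Int) (h : ¬ n < 0) :
    PySem.Int.toChars n = pvRep n.toNat := by
  simp only [PySem.Int.toChars, if_neg h, Nat.toDigits]
  rw [pvToDigitsCore_eq _ _ _ (by omega)]
  simp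

/-- The arithmetic characterisation of A's per-number string test. -/
def pvPb (n : Int) : Prop := ∃ k x : Nat, 1 ≤ k ∧ 10 ^ (k - 1) ≤ x ∧ x < 10 ^ k ∧ n = (x : Int) * (10 ^ k + 1)

/-- A's per-number test, as a Bool predicate. -/
def pvPred (num : Int) : Bool :=
  let snum := PySem.Int.toStr num
  let snum_len : Int := PySem.Str.len snum
  (PySem.Int.mod snum_len 2 == 0) &&
    (PySem.Str.slice snum none (some (PySem.Int.floordiv snum_len 2))
      == PySem.Str.slice snum (some (PySem.Int.floordiv snum_len 2)) none)

theorem pvPred_eq (n : Int) : pvPred n = true ↔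
    ((PySem.Int.toChars n).length % 2 = 0 ∧
     (PySem.Int.toChars n).take ((PySem.Int.toChars n).length / 2)
       = (PySem.Int.toChars n).drop ((PySem.Int.toChars n).length / 2)) := by
  set cs := PySem.Int.toChars n with hcs
  have hlen : PySem.Str.len (PySem.Int.toStr n) = (cs.length : Int) := by
    rw [PySem.Str.len_eq, PySem.Int.toList_toStr]
  have h2 : (2 : Int) = ((2 : Nat) : Int) := rfl
  simp only [pvPred, hlen, Bool.and_eq_true, beq_iff_eq]
  rw [h2, PySem.Int.mod_natCast, PySem.Int.floordiv_natCast]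
  constructor
  · rintro ⟨hm, hs⟩
    refine ⟨by exact_mod_cast hm, ?_⟩
    have := String.toList_inj.mpr hs
    rw [PySem.Str.toList_slice, PySem.Str.toList_slice, PySem.Chars.slice_eq_listSlice,
        PySem.Chars.slice_eq_listSlice, PySem.Int.toList_toStr,
        PySem.List.slice_to_natCast, PySem.List.slice_from_natCast] at this
    exact this
  · rintro ⟨hm, hs⟩
    refine ⟨by exact_mod_cast hm, ?_⟩
    apply String.toList_inj.mp
    rw [PySem.Str.toList_slice, PySem.Str.toList_slice, PySem.Chars.slice_eq_listSlice,
        PySem.Chars.slice_eq_listSlice, PySem.Int.toList_toStr,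
        PySem.List.slice_to_natCast, PySem.List.slice_from_natCast]
    exact hs

theorem pvPred_iff (n : Int) : pvPred n = true ↔ pvPb n := by
  rw [pvPred_eq]
  by_cases hneg : n < 0
  · rw [pvToChars_neg n hneg]
    constructor
    · rintro ⟨hm, hs⟩
      exfalso
      set r := pvRep n.natAbs with hr
      have hrl : 1 ≤ r.length := pvRep_len_pos n.natAbs
      set cs := '-' :: r with hcs
      have hL : cs.length = r.length + 1 := by simp [hcs]
      set h := cs.length / 2 with hh
      have hh1 : 1 ≤ h ∧ h < cs.length := by omega
      have e0 : (cs.take h)[0]? = some '-' := by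
        rw [List.getElem?_take_of_lt (by omega)]
        simp [hcs]
      have e1 : (cs.drop h)[0]? = r[h-1]? := by
        rw [List.getElem?_drop]
        simp only [hcs]
        rw [List.getElem?_cons]
        simp only [if_neg (by omega : ¬ h + 0 = 0)]
        norm_num
      have hmem : h - 1 < r.length := by omega
      rw [hs, e1] at e0
      have : r[h-1] = '-' := by
        have := List.getElem?_eq_getElem (l := r) (i := h-1) hmem
        rw [this] at e0
        simpa using e0
      have h48 := pvMem_pvRep_ge n.natAbs r[h-1] (List.getElem_mem hmem)
      rw [this] at h48
      simp at h48
    · rintro ⟨k, x, hk, hx1, hx2, hn⟩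
      exfalso
      have : 1 ≤ x := le_trans (Nat.one_le_pow _ _ (by omega)) hx1
      have : (0:Int) < (x : Int) * (10 ^ k + 1) := by positivity
      omega
  · rw [pvToChars_nonneg n hneg]
    constructor
    · rintro ⟨hm, hs⟩
      set nn := n.toNat with hnn
      by_cases h0 : nn = 0
      · exfalso
        rw [h0, pvRep_lt 0 (by omega)] at hm
        simp at hm
      · set cs := pvRep nn with hcs
        set L := cs.length with hL
        have hL1 : 1 ≤ L := pvRep_len_pos nn
        set h := L / 2 with hh
        have hLh : L = 2 * h := by omega
        have hh1 : 1 ≤ h := by omega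
        set t := cs.take h with ht
        have htl : t.length = h := by
          rw [ht, List.length_take]
          omega
        have hsplit : cs = t ++ t := by
          conv_lhs => rw [← List.take_append_drop h cs]
          rw [← hs, ← ht]
        have hval : nn = pvVal t * 10 ^ h + pvVal t := by
          have := pvVal_pvRep nn
          rw [← hcs] at this
          rw [← this, hsplit, pvVal_append, htl]
        set x := pvVal t with hx
        have hb := pvRep_len_bounds nn (by omega)
        rw [← hcs, ← hL, hLh] at hb
        have hxu : x < 10 ^ h := by
          have h1 : x * 10 ^ h < 10 ^ (2 * h) := by omega
          have h2 : (10:Nat) ^ (2*h) = 10 ^ h * 10 ^ h := by rw [two_mul, pow_add]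
          rw [h2] at h1
          exact Nat.lt_of_mul_lt_mul_right h1
        have hxl : 10 ^ (h - 1) ≤ x := by
          by_contra hc
          push Not at hc
          have hP : (10:Nat) ^ h = 10 ^ (h-1) * 10 := by
            conv_lhs => rw [show h = (h-1)+1 by omega]
            rw [pow_succ]
          have hQ : (10:Nat) ^ (2*h - 1) = 10 ^ (h-1) * 10 ^ h := by
            rw [← pow_add]
            congr 1
            omega
          have hlow : 10 ^ (2*h - 1) ≤ nn := hb.1
          set P := (10:Nat) ^ (h-1)
          set Q := (10:Nat) ^ h
          have hPQ : Q = P * 10 := hP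
          have hx9 : x ≤ P - 1 := by omega
          have hP1 : 1 ≤ P := Nat.one_le_pow _ _ (by omega)
          nlinarith [hval, hlow, hQ]
        refine ⟨h, x, hh1, hxl, hxu, ?_⟩
        have : n = (nn : Int) := by omega
        rw [this, hval]
        push_cast
        ring
    · rintro ⟨k, x, hk, hx1, hx2, hn⟩
      have hx0 : 1 ≤ x := le_trans (Nat.one_le_pow _ _ (by omega)) hx1
      have hnn : n.toNat = x * 10 ^ k + x := by
        have : n = ((x * 10 ^ k + x : Nat) : Int) := by rw [hn]; push_cast; ring
        omega
      have hlx : (pvRep x).length = k := pvRep_len_of_bounds x k hx1 hx2 hk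
      have hsplit : pvRep n.toNat = pvRep x ++ pvRep x := by
        rw [hnn]
        exact pvRep_concat k x x hx0 hlx
      rw [hsplit]
      have hL : (pvRep x ++ pvRep x).length = 2 * k := by
        simp [hlx, two_mul]
      rw [hL]
      have hk2 : 2 * k / 2 = k := by omega
      rw [hk2]
      refine ⟨by omega, ?_⟩
      rw [List.take_left' hlx, List.drop_left' hlx]

theorem pvA_eq_filter (low high : Int) :
    find_invalid_ids_in_range low high = (PySem.List.pyRange low (high + 1) 1).filter pvPred := by
  unfold find_invalid_ids_in_range
  have hbody : (fun (invalid_ids : List Int) (num : Int) =>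
      let snum := PySem.Int.toStr num
      let snum_len : Int := PySem.Str.len snum
      if PySem.Int.mod snum_len 2 ≠ 0 then invalid_ids
      else if PySem.Str.slice snum none (some (PySem.Int.floordiv snum_len 2))
            = PySem.Str.slice snum (some (PySem.Int.floordiv snum_len 2)) none
      then invalid_ids ++ [num]
      else invalid_ids)
      = fun invalid_ids num => if pvPred num then invalid_ids ++ [id num] else invalid_ids := by
    funext acc num
    simp only [pvPred, Bool.and_eq_true, beq_iff_eq, id]
    by_cases h1 : PySem.Int.mod (PySem.Str.len (PySem.Int.toStr num)) 2 = 0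
    · by_cases h2 : PySem.Str.slice (PySem.Int.toStr num) none
          (some (PySem.Int.floordiv (PySem.Str.len (PySem.Int.toStr num)) 2))
          = PySem.Str.slice (PySem.Int.toStr num)
            (some (PySem.Int.floordiv (PySem.Str.len (PySem.Int.toStr num)) 2)) none
      · rw [if_neg (not_not_intro h1), if_pos h2, if_pos ⟨h1, h2⟩]
      · rw [if_neg (not_not_intro h1), if_neg h2, if_neg (by tauto)]
    · rw [if_pos h1, if_neg (by tauto)]
  rw [hbody, PySem.List.foldl_append_if]
  simp

/-- One block of B: all valid ids with half-length k, clipped to [low, high]. -/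
def pvBlk (low high : Int) (k : Int) : List Int :=
  (PySem.List.pyRange
      (max (10 ^ (k - 1).toNat) (-(PySem.Int.floordiv (-low) (10 ^ k.toNat + 1))))
      (min (10 ^ k.toNat - 1) (PySem.Int.floordiv high (10 ^ k.toNat + 1)) + 1) 1).map
    (· * (10 ^ k.toNat + 1))

theorem pvB_eq (low high : Int) (h : ¬ high < 1) :
    find_invalid_ids_in_range_alt low high
      = (PySem.List.pyRange 1 (PySem.Int.floordiv (PySem.Str.len (PySem.Int.toStr high)) 2 + 1) 1).flatMap
          (pvBlk low high) := by
  unfold find_invalid_ids_in_range_alt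
  rw [if_neg h]
  have hbody : (fun (invalid_ids : List Int) (k : Int) =>
      let m : Int := 10 ^ k.toNat + 1
      let x_lo : Int := max (10 ^ (k - 1).toNat) (-(PySem.Int.floordiv (-low) m))
      let x_hi : Int := min (10 ^ k.toNat - 1) (PySem.Int.floordiv high m)
      (PySem.List.pyRange x_lo (x_hi + 1) 1).foldl
        (fun acc x => acc ++ [x * m]) invalid_ids)
      = fun acc k => acc ++ pvBlk low high k := by
    funext acc k
    simp only []
    rw [show (fun (acc : List Int) (x : Int) => acc ++ [x * (10 ^ k.toNat + 1)])
          = fun acc x => acc ++ [(fun y => y * (10 ^ k.toNat + 1)) x] from rfl,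
        PySem.List.foldl_append_singleton_eq_map]
    rfl
  rw [hbody, PySem.List.foldl_append_eq_flatMap]
  rfl

theorem pvF1 (high x m : Int) (hm : 0 < m) : x ≤ PySem.Int.floordiv high m ↔ x * m ≤ high := by
  rw [PySem.Int.floordiv_eq_ediv_of_pos hm]
  exact Int.le_ediv_iff_mul_le hm

theorem pvF2 (low x m : Int) (hm : 0 < m) : -(PySem.Int.floordiv (-low) m) ≤ x ↔ low ≤ x * m := by
  rw [PySem.Int.floordiv_eq_ediv_of_pos hm, neg_le, Int.le_ediv_iff_mul_le hm, neg_mul,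
    neg_le_neg_iff]

theorem pvMem_blk (low high : Int) (k : Int) (hk : 1 ≤ k) (n : Int) :
    n ∈ pvBlk low high k ↔ ∃ x : Int,
      (10 : Int) ^ (k.toNat - 1) ≤ x ∧ x ≤ 10 ^ k.toNat - 1 ∧ low ≤ x * (10 ^ k.toNat + 1) ∧
        x * (10 ^ k.toNat + 1) ≤ high ∧ n = x * (10 ^ k.toNat + 1) := by
  have hm : (0:Int) < 10 ^ k.toNat + 1 := by positivity
  have hk1 : (k - 1).toNat = k.toNat - 1 := by omega
  unfold pvBlk
  simp only [List.mem_map, PySem.List.mem_pyRange_one, max_le_iff, Int.lt_add_one_iff,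
    le_min_iff, hk1]
  constructor
  · rintro ⟨x, ⟨⟨h1, h2⟩, h3, h4⟩, rfl⟩
    exact ⟨x, h1, h3, (pvF2 low x _ hm).mp h2, (pvF1 high x _ hm).mp h4, rfl⟩
  · rintro ⟨x, h1, h2, h3, h4, rfl⟩
    exact ⟨x, ⟨⟨h1, (pvF2 low x _ hm).mpr h3⟩, h2, (pvF1 high x _ hm).mpr h4⟩, rfl⟩

theorem pvKmax (high : Int) (h : ¬ high < 1) :
    PySem.Int.floordiv (PySem.Str.len (PySem.Int.toStr high)) 2
      = (((pvRep high.toNat).length / 2 : Nat) : Int) := by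
  rw [PySem.Str.len_eq, PySem.Int.toList_toStr, pvToChars_nonneg high (by omega)]
  exact_mod_cast PySem.Int.floordiv_natCast (pvRep high.toNat).length 2

theorem pvPb_pos (n : Int) (h : pvPb n) : 0 < n := by
  obtain ⟨k, x, hk, hx1, hx2, hn⟩ := h
  have : 1 ≤ x := le_trans (Nat.one_le_pow _ _ (by omega)) hx1
  rw [hn]
  positivity

theorem pvK_le_kmax (high : Int) (k : Nat) (hk : 1 ≤ k)
    (hle : ((10 ^ (2*k - 1) : Nat) : Int) ≤ high) : k ≤ (pvRep high.toNat).length / 2 := by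
  set P := (10:Nat) ^ (2*k - 1) with hP
  have hP1 : 1 ≤ P := Nat.one_le_pow _ _ (by omega)
  have hPle : P ≤ high.toNat := by omega
  have hb := pvRep_len_bounds high.toNat (by omega)
  have : P < 10 ^ (pvRep high.toNat).length := by omega
  have hlt : 2*k - 1 < (pvRep high.toNat).length :=
    (Nat.pow_lt_pow_iff_right (by omega)).mp this
  omega

theorem pvB_mem (low high : Int) (h : ¬ high < 1) (n : Int) :
    (n ∈ (PySem.List.pyRange 1 (PySem.Int.floordiv (PySem.Str.len (PySem.Int.toStr high)) 2 + 1) 1).flatMap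
        (pvBlk low high))
      ↔ (pvPb n ∧ low ≤ n ∧ n ≤ high) := by
  rw [List.mem_flatMap, pvKmax high h]
  constructor
  · rintro ⟨kI, hkI, hblk⟩
    rw [PySem.List.mem_pyRange_one] at hkI
    obtain ⟨hk1, _⟩ := hkI
    rw [pvMem_blk low high kI hk1 n] at hblk
    obtain ⟨x, hx1, hx2, hlo, hhi, rfl⟩ := hblk
    set κ := kI.toNat with hκ
    have hκ1 : 1 ≤ κ := by omega
    have hxpos : 0 < x := lt_of_lt_of_le (by positivity) hx1
    refine ⟨⟨κ, x.toNat, hκ1, ?_, ?_, ?_⟩, hlo, hhi⟩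
    · have : ((10 ^ (κ - 1) : Nat) : Int) ≤ x := by push_cast; exact hx1
      omega
    · have : x < ((10 ^ κ : Nat) : Int) := by push_cast; omega
      omega
    · have hxx : (x.toNat : Int) = x := by omega
      rw [hxx]
  · rintro ⟨⟨k, x, hk, hx1, hx2, rfl⟩, hlo, hhi⟩
    refine ⟨(k : Int), ?_, ?_⟩
    · rw [PySem.List.mem_pyRange_one]
      constructor
      · exact_mod_cast hk
      · rw [Int.lt_add_one_iff]
        have hbig : ((10 ^ (2*k - 1) : Nat) : Int) ≤ high := by
          refine le_trans ?_ hhi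
          have hN : (10:Nat) ^ (2*k - 1) ≤ x * (10 ^ k + 1) := by
            calc (10:Nat) ^ (2*k-1) = 10 ^ (k-1) * 10 ^ k := by
                  rw [← pow_add]; congr 1; omega
              _ ≤ x * 10 ^ k := Nat.mul_le_mul_right _ hx1
              _ ≤ x * (10 ^ k + 1) := Nat.mul_le_mul_left _ (by omega)
          calc ((10 ^ (2*k - 1) : Nat) : Int) ≤ ((x * (10 ^ k + 1) : Nat) : Int) := by
                exact_mod_cast hN
            _ = (x : Int) * (10 ^ k + 1) := by push_cast; ring
        exact_mod_cast pvK_le_kmax high k hk hbig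
    · have hκ : (k : Int).toNat = k := by omega
      rw [pvMem_blk low high (k : Int) (by exact_mod_cast hk), hκ]
      refine ⟨(x : Int), by exact_mod_cast hx1, ?_, hlo, hhi, rfl⟩
      have hc : ((x:Nat) : Int) < ((10 ^ k : Nat) : Int) := by exact_mod_cast hx2
      push_cast at hc
      omega

theorem pvB_pairwise (low high : Int) :
    ((PySem.List.pyRange 1 (PySem.Int.floordiv (PySem.Str.len (PySem.Int.toStr high)) 2 + 1) 1).flatMap
        (pvBlk low high)).Pairwise (· < ·) := by
  rw [List.pairwise_flatMap]
  constructor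
  · intro kI _
    unfold pvBlk
    have hm : (0:Int) < 10 ^ kI.toNat + 1 := by positivity
    exact (PySem.List.pairwise_lt_pyRange_one _ _).map _
      (fun a b hab => by exact mul_lt_mul_of_pos_right hab hm)
  · have := PySem.List.pairwise_lt_pyRange_one 1
      (PySem.Int.floordiv (PySem.Str.len (PySem.Int.toStr high)) 2 + 1)
    refine List.Pairwise.imp_of_mem ?_ this
    intro kI kJ hkI hkJ hlt y hy z hz
    rw [PySem.List.mem_pyRange_one] at hkI hkJ
    rw [pvMem_blk low high kI hkI.1 y] at hy
    rw [pvMem_blk low high kJ hkJ.1 z] at hz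
    obtain ⟨x, hx1, hx2, _, _, rfl⟩ := hy
    obtain ⟨w, hw1, hw2, _, _, rfl⟩ := hz
    set a := kI.toNat with ha
    set b := kJ.toNat with hb
    have hab : a + 1 ≤ b := by omega
    have ha1 : 1 ≤ a := by omega
    have h10a : (1:Int) ≤ 10 ^ a := one_le_pow₀ (by omega)
    have hxp : (0:Int) < x := lt_of_lt_of_le (by positivity) hx1
    have hyle : x * (10 ^ a + 1) ≤ (10 ^ a - 1) * (10 ^ a + 1) :=
      mul_le_mul_of_nonneg_right (by omega) (by positivity)
    have hzge : (10 : Int) ^ (b - 1) * 10 ^ b ≤ w * (10 ^ b + 1) := by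
      calc (10:Int) ^ (b-1) * 10 ^ b ≤ 10 ^ (b-1) * (10 ^ b + 1) := by
            have : (0:Int) < 10 ^ (b-1) := by positivity
            nlinarith
        _ ≤ w * (10 ^ b + 1) := mul_le_mul_of_nonneg_right hw1 (by positivity)
    have hmid : (10 ^ a - 1) * (10 ^ a + 1) < (10 : Int) ^ (b - 1) * 10 ^ b := by
      have e1 : ((10:Int) ^ a - 1) * (10 ^ a + 1) = 10 ^ a * 10 ^ a - 1 := by ring
      have l1 : (10:Int) ^ a ≤ 10 ^ (b - 1) := pow_le_pow_right₀ (by omega) (by omega)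
      have l2 : (10:Int) ^ a ≤ 10 ^ b := pow_le_pow_right₀ (by omega) (by omega)
      have hpa : (0:Int) < 10 ^ a := by positivity
      nlinarith
    omega

-- ===== VERDICT (by name: the statement is the Claim_ definition above) =====
theorem find_invalid_ids_in_range_spec : Claim_equal_find_invalid_ids_in_range := by
  intro low high _
  show find_invalid_ids_in_range low high = find_invalid_ids_in_range_alt low high
  rw [pvA_eq_filter]
  by_cases h : high < 1
  · unfold find_invalid_ids_in_range_alt
    rw [if_pos h, List.filter_eq_nil_iff]
    intro n hn
    rw [PySem.List.mem_pyRange_one] at hn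
    intro hp
    have := pvPb_pos n ((pvPred_iff n).mp hp)
    omega
  · rw [pvB_eq low high h]
    have hApw : ((PySem.List.pyRange low (high + 1) 1).filter pvPred).Pairwise (· < ·) :=
      (PySem.List.pairwise_lt_pyRange_one low (high + 1)).filter pvPred
    have hBpw := pvB_pairwise low high
    have hmem : ∀ n : Int, n ∈ (PySem.List.pyRange low (high + 1) 1).filter pvPred ↔
        n ∈ (PySem.List.pyRange 1
            (PySem.Int.floordiv (PySem.Str.len (PySem.Int.toStr high)) 2 + 1) 1).flatMap
          (pvBlk low high) := by
      intro n
      rw [List.mem_filter, PySem.List.mem_pyRange_one, pvB_mem low high h n, pvPred_iff]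
      constructor
      · rintro ⟨⟨h1, h2⟩, h3⟩
        exact ⟨h3, h1, by omega⟩
      · rintro ⟨h1, h2, h3⟩
        exact ⟨⟨h2, by omega⟩, h1⟩
    have hnodA : ((PySem.List.pyRange low (high + 1) 1).filter pvPred).Nodup :=
      hApw.imp (fun hab => ne_of_lt hab)
    have hnodB := hBpw.imp (fun hab => ne_of_lt hab)
    have hperm := List.perm_of_nodup_nodup_toFinset_eq hnodA hnodB
      (by ext n; simp only [List.mem_toFinset]; exact hmem n)
    exact List.Perm.eq_of_pairwise (fun a b _ _ h1 h2 => absurd h1 (lt_asymm h2)) hApw hBpw hperm
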